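-- pv_equiv track=rewrite | github.com/Bhargavi2212/Fresh_flow | backend/agents/output_parser.py | _find_last_json_object
-- ===== SOURCE A (Python) =====
-- def _find_last_json_object(text: str) -> str | None:
--     """Find the last complete {...} JSON object in text by matching braces."""
--     start = text.rfind("{")
--     if start == -1:
--         return None
--     depth = 0
--     for i in range(start, len(text)):
--         if text[i] == "{":
--             depth += 1
--         elif text[i] == "}":
--             depth -= 1
--             if depth == 0:
--                 return text[start : i + 1]
--     return None
-- ===== SOURCE B (Python) =====
-- def _find_last_json_object(text: str) -> str | None:
--     """Find the last complete {...} JSON object in text by matching braces."""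
--     start = text.rfind("{")
--     if start == -1:
--         return None
--     end = text.find("}", start)
--     if end == -1:
--         return None
--     return text[start:end + 1]
-- ===== Notes on version B (the rewrite author's own statement) =====
-- stated objective: simpler
-- what changed: Replaces the forward depth-counting loop with two direct string searches: since start is the LAST '{', no opener follows it, so the first '}' at or after start closes it; B is rfind + find + one slice, no loop or depth counter.
import Mathlib
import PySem

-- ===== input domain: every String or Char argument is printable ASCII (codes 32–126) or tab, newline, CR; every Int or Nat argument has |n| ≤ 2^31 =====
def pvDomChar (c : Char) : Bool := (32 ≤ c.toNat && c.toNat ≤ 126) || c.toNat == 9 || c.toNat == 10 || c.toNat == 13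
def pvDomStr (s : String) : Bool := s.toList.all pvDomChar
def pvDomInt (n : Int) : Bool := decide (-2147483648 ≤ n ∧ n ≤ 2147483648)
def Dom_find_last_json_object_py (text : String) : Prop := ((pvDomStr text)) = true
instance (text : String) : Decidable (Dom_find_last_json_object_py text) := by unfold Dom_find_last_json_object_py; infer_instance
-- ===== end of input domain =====

-- B replaces A's depth-counting scan with two direct string searches (rfind '{', find '}'): simpler, no loop.

-- ===== PORT A =====
-- the 'for i in range(start, len(text))' loop of A: recursion over the remaining
-- characters, carrying the loop index i and the depth counter, returning the i at
-- which Python would return (text[start:i+1]) or none if the loop falls through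
def pvALoop (suffix : List Char) (i : Int) (depth : Int) : Option Int :=
  match suffix with
  | [] => none
  | c :: rest =>
    if c = '{' then pvALoop rest (i + 1) (depth + 1)
    else if c = '}' then
      if depth - 1 = 0 then some i else pvALoop rest (i + 1) (depth - 1)
    else pvALoop rest (i + 1) depth

def find_last_json_object_py (text : String) : Option String :=
  let start := PySem.Str.rfind text "{"
  if start = -1 then none
  else
    match pvALoop (text.toList.drop start.toNat) start 0 with
    | none => none
    | some i => some (PySem.Str.slice text (some start) (some (i + 1)))

-- ===== PORT B =====
def find_last_json_object_py_alt (text : String) : Option String :=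
  let start := PySem.Str.rfind text "{"
  if start = -1 then none
  else
    let stop := PySem.Str.findFrom text "}" start none
    if stop = -1 then none
    else some (PySem.Str.slice text (some start) (some (stop + 1)))

-- ===== PRECONDITION & SPEC =====
def Spec_find_last_json_object_py (text : String) (out : Option String) : Prop := out = find_last_json_object_py_alt text
instance (text : String) (out : Option String) : Decidable (Spec_find_last_json_object_py text out) := by unfold Spec_find_last_json_object_py; infer_instance

-- ===== CLAIM (what is proved, stated in full; the proofs are below) =====
def Claim_equal_find_last_json_object_py : Prop := ∀ (text : String), Dom_find_last_json_object_py text → Spec_find_last_json_object_py text (find_last_json_object_py text)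

-- ===== LEMMAS AND PROOFS =====

-- [d] is a prefix exactly when the first character is d
lemma pvPrefixSingleton (d : Char) (xs : List Char) :
    [d].isPrefixOf xs = true ↔ xs[0]? = some d := by
  rw [List.isPrefixOf_iff_prefix]
  cases xs with
  | nil => simp
  | cons a l => simp [List.cons_prefix_cons, eq_comm]

-- [d] is an infix exactly when d occurs
lemma pvSingletonInfix (d : Char) (l : List Char) : [d] <:+: l ↔ d ∈ l := by
  constructor
  · intro h; exact h.mem (by simp)
  · intro h
    obtain ⟨s, t, rfl⟩ := List.append_of_mem h
    exact ⟨s, t, by simp⟩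

-- spec of rfind.go for a single-character needle: the highest occurrence ≤ n, or -1
lemma pvGoSpec (s : List Char) (d : Char) (n : Nat) :
    (PySem.Chars.rfind.go s [d] n = -1 ∧ ∀ i : Nat, i ≤ n → s[i]? ≠ some d) ∨
    (∃ j : Nat, j ≤ n ∧ PySem.Chars.rfind.go s [d] n = (j : Int) ∧ s[j]? = some d ∧
      ∀ i : Nat, j < i → i ≤ n → s[i]? ≠ some d) := by
  induction n with
  | zero =>
    by_cases h : s[0]? = some d
    · right
      refine ⟨0, le_refl _, ?_, h, by omega⟩
      simp [PySem.Chars.rfind.go, (pvPrefixSingleton d s).2 h]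
    · left
      refine ⟨?_, ?_⟩
      · simp only [PySem.Chars.rfind.go]
        rw [if_neg]; intro hp; exact h ((pvPrefixSingleton d s).1 hp)
      · intro i hi; interval_cases i; exact h
  | succ m ih =>
    have hdrop : (s.drop (m + 1))[0]? = s[m + 1]? := by
      rw [List.getElem?_drop]
    by_cases h : s[m + 1]? = some d
    · right
      refine ⟨m + 1, le_refl _, ?_, h, by omega⟩
      simp only [PySem.Chars.rfind.go]
      rw [if_pos ((pvPrefixSingleton d _).2 (by rw [hdrop]; exact h))]
    · have hnp : ¬ [d].isPrefixOf (s.drop (m + 1)) = true := by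
        intro hp; exact h (hdrop ▸ (pvPrefixSingleton d _).1 hp)
      have hgo : PySem.Chars.rfind.go s [d] (m + 1) = PySem.Chars.rfind.go s [d] m := by
        simp only [PySem.Chars.rfind.go]; rw [if_neg hnp]
      rcases ih with ⟨h1, h2⟩ | ⟨j, hj, h1, h2, h3⟩
      · left
        refine ⟨hgo.trans h1, ?_⟩
        intro i hi
        rcases Nat.lt_or_ge i (m + 1) with hlt | hge
        · exact h2 i (by omega)
        · have : i = m + 1 := by omega
          rw [this]; exact h
      · right
        refine ⟨j, by omega, hgo.trans h1, h2, ?_⟩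
        intro i hji hi
        rcases Nat.lt_or_ge i (m + 1) with hlt | hge
        · exact h3 i hji (by omega)
        · have : i = m + 1 := by omega
          rw [this]; exact h
lemma pvRfindSpec (s : List Char) (d : Char) :
    (PySem.Chars.rfind s [d] = -1 ∧ ∀ i : Nat, s[i]? ≠ some d) ∨
    (∃ j : Nat, PySem.Chars.rfind s [d] = (j : Int) ∧ s[j]? = some d ∧
      ∀ i : Nat, j < i → s[i]? ≠ some d) := by
  rcases pvGoSpec s d s.length with ⟨h1, h2⟩ | ⟨j, hj, h1, h2, h3⟩
  · left
    refine ⟨h1, fun i => ?_⟩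
    rcases Nat.lt_or_ge i (s.length + 1) with hlt | hge
    · exact h2 i (by omega)
    · simp [List.getElem?_eq_none (by omega : s.length ≤ i)]
  · right
    refine ⟨j, h1, h2, fun i hji => ?_⟩
    rcases Nat.lt_or_ge i (s.length + 1) with hlt | hge
    · exact h3 i hji (by omega)
    · simp [List.getElem?_eq_none (by omega : s.length ≤ i)]

-- first occurrence of d: head case and cons case for Chars.find with a single-char needle
lemma pvFindHead (d : Char) (rest : List Char) : PySem.Chars.find (d :: rest) [d] = 0 := by
  have hinf : [d] <:+: (d :: rest) := (pvSingletonInfix d _).2 (by simp)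
  have hpos : 0 ≤ PySem.Chars.find (d :: rest) [d] :=
    (PySem.Chars.find_nonneg_iff _ _).2 hinf
  obtain ⟨hpre, hmin⟩ := PySem.Chars.find_spec hpos
  by_contra hne
  have h0 : (PySem.Chars.find (d :: rest) [d]).toNat ≠ 0 := by
    intro h; exact hne (by omega)
  exact hmin 0 (by omega) (by simp)

lemma pvFindCons (c d : Char) (rest : List Char) (hne : c ≠ d) :
    PySem.Chars.find (c :: rest) [d] =
      if PySem.Chars.find rest [d] = -1 then -1 else PySem.Chars.find rest [d] + 1 := by
  by_cases hr : PySem.Chars.find rest [d] = -1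
  · rw [if_pos hr]
    rw [PySem.Chars.find_eq_neg_one_iff] at hr ⊢
    rw [pvSingletonInfix] at hr ⊢
    simp [hne.symm, hr]
  · rw [if_neg hr]
    have hpos : 0 ≤ PySem.Chars.find rest [d] := by
      have := PySem.Chars.neg_one_le_find rest [d]
      omega
    obtain ⟨hpre, hmin⟩ := PySem.Chars.find_spec hpos
    set f := (PySem.Chars.find rest [d]).toNat with hf
    have hinf : [d] <:+: (c :: rest) := by
      rw [pvSingletonInfix]
      have : d ∈ rest := List.mem_of_mem_drop (hpre.sublist.subset (by simp))
      simp [this]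
    have hpos2 : 0 ≤ PySem.Chars.find (c :: rest) [d] :=
      (PySem.Chars.find_nonneg_iff _ _).2 hinf
    obtain ⟨hpre2, hmin2⟩ := PySem.Chars.find_spec hpos2
    set g := (PySem.Chars.find (c :: rest) [d]).toNat with hg
    have hat : [d] <+: (c :: rest).drop (f + 1) := by
      simpa using hpre
    have hgle : g ≤ f + 1 := by
      by_contra hc
      exact hmin2 (f + 1) (by omega) hat
    have hg0 : g ≠ 0 := by
      intro h
      rw [h] at hpre2
      simp [List.cons_prefix_cons] at hpre2
      exact hne hpre2.symm
    have hglt : ¬ g < f + 1 := by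
      intro hc
      have : [d] <+: rest.drop (g - 1) := by
        have := hpre2
        rw [show g = (g - 1) + 1 by omega] at this
        simpa using this
      exact hmin (g - 1) (by omega) this
    have : g = f + 1 := by omega
    omega

-- after the last '{' the depth stays 1, so A's loop returns at the first '}'
lemma pvLoopChar (t : List Char) (hnot : '{' ∉ t) :
    ∀ i : Int, pvALoop t i 1 =
      if PySem.Chars.find t ['}'] = -1 then none
      else some (i + PySem.Chars.find t ['}']) := by
  induction t with
  | nil =>
    intro i
    simp [pvALoop, show PySem.Chars.find [] ['}'] = -1 from by decide]
  | cons c rest ih =>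
    intro i
    have hc : c ≠ '{' := fun h => hnot (h ▸ List.mem_cons_self ..)
    have hrest : '{' ∉ rest := fun h => hnot (List.mem_cons_of_mem _ h)
    by_cases hcb : c = '}'
    · subst hcb
      rw [pvFindHead]
      simp [pvALoop, hc]
    · rw [pvFindCons c '}' rest hcb]
      have : pvALoop (c :: rest) i 1 = pvALoop rest (i + 1) 1 := by
        simp [pvALoop, hc, hcb]
      rw [this, ih hrest (i + 1)]
      by_cases hr : PySem.Chars.find rest ['}'] = -1
      · simp [hr]
      · simp only [hr, if_false]
        rw [if_neg (by have := PySem.Chars.neg_one_le_find rest ['}']; omega)]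
        congr 1
        ring

-- ===== VERDICT (by name: the statement is the Claim_ definition above) =====
theorem find_last_json_object_py_spec : Claim_equal_find_last_json_object_py := by
  intro text _
  show find_last_json_object_py text = find_last_json_object_py_alt text
  have hob : ("{" : String).toList = ['{'] := rfl
  have hcb : ("}" : String).toList = ['}'] := rfl
  simp only [find_last_json_object_py, find_last_json_object_py_alt, PySem.Str.rfind_eq,
    PySem.Str.findFrom_eq, hob, hcb]
  set cs := text.toList with hcs
  rcases pvRfindSpec cs '{' with ⟨h1, _⟩ | ⟨j, h1, h2, h3⟩
  · simp [h1]
  · rw [h1]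
    have hjlt : j < cs.length := by
      by_contra hc
      rw [List.getElem?_eq_none (by omega)] at h2
      simp at h2
    have hjne : ((j : Int)) ≠ -1 := by omega
    rw [if_neg hjne, if_neg hjne]
    have htn : ((j : Int)).toNat = j := by omega
    obtain ⟨_, hjget⟩ := List.getElem?_eq_some_iff.1 h2
    have hdj : cs.drop j = '{' :: cs.drop (j + 1) := by
      rw [List.drop_eq_getElem_cons hjlt, hjget]
    set t := cs.drop (j + 1) with ht
    have hnot : '{' ∉ t := by
      intro hmem
      obtain ⟨m, hm, hget⟩ := List.getElem_of_mem hmem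
      have : cs[j + 1 + m]? = some '{' := by
        rw [← List.getElem?_drop, ← ht, List.getElem?_eq_getElem hm, hget]
      exact h3 (j + 1 + m) (by omega) this
    have hA : pvALoop (cs.drop ((j : Int)).toNat) (j : Int) 0 = pvALoop t ((j : Int) + 1) 1 := by
      rw [htn, hdj]
      simp [pvALoop]
    rw [hA, pvLoopChar t hnot]
    rw [PySem.Chars.findFrom_natCast cs ['}'] j (by omega)]
    rw [hdj, pvFindCons '{' '}' t (by decide)]
    by_cases hr : PySem.Chars.find t ['}'] = -1
    · simp [hr]
    · have hge : 0 ≤ PySem.Chars.find t ['}'] := by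
        have := PySem.Chars.neg_one_le_find t ['}']
        omega
      rw [if_neg hr]
      simp only [if_neg hr]
      rw [if_neg (by omega), if_neg (by omega)]
      congr 2
      exact congrArg some (by ring)
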